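-- pv_equiv track=rewrite | github.com/lukacslacko/csaszar | cell_search.py | _link_is_cycle
-- ===== SOURCE A (Python) =====
-- def _link_is_cycle(v, faces_containing):
--     link_edges, link_verts = [], set()
--     for face in faces_containing:
--         opp = [x for x in face if x != v]
--         link_edges.append(tuple(sorted(opp))); link_verts.update(opp)
--     if not link_verts: return False
--     deg = {u: 0 for u in link_verts}
--     for a, b in link_edges:
--         deg[a] += 1; deg[b] += 1
--     if any(d != 2 for d in deg.values()): return False
--     adj = {u: [] for u in link_verts}
--     for a, b in link_edges:
--         adj[a].append(b); adj[b].append(a)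
--     start = next(iter(link_verts)); seen = {start}; stk = [start]
--     while stk:
--         u = stk.pop()
--         for w in adj[u]:
--             if w not in seen: seen.add(w); stk.append(w)
--     return len(seen) == len(link_verts)
-- ===== SOURCE B (Python) =====
-- def _link_is_cycle(v, faces_containing):
--     # Link vertices in first-seen order.
--     verts = []
--     for face in faces_containing:
--         for x in face:
--             if x != v and x not in verts:
--                 verts.append(x)
--     if not verts:
--         return False
--     # Link edges as sorted endpoint pairs.
--     edges = []
--     for face in faces_containing:
--         a, b = sorted(x for x in face if x != v)
--         edges.append((a, b))
--     # 2-regularity check via a plain counting dict.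
--     deg = {}
--     for a, b in edges:
--         deg[a] = deg.get(a, 0) + 1
--         deg[b] = deg.get(b, 0) + 1
--     if any(deg.get(u, 0) != 2 for u in verts):
--         return False
--     # Connectivity by edge-list relaxation (Bellman-Ford style closure),
--     # no adjacency list and no stack: len(verts) sweeps over the edge list.
--     reach = {verts[0]}
--     for _ in range(len(verts)):
--         for a, b in edges:
--             if a in reach or b in reach:
--                 reach.add(a)
--                 reach.add(b)
--     return all(u in reach for u in verts)
-- ===== Notes on version B (the rewrite author's own statement) =====
-- stated objective: alternative
-- what changed: Replaces the adjacency-list + explicit-stack DFS connectivity test with an edge-list relaxation closure (Bellman-Ford style sweeps over the edge list, no adjacency structure), builds the vertex list and degree counts directly from the faces/edges with a plain counting dict instead of a pre-initialised dict over the vertex set, and hoists the empty-link early return before edge unpacking.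
import Mathlib
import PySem

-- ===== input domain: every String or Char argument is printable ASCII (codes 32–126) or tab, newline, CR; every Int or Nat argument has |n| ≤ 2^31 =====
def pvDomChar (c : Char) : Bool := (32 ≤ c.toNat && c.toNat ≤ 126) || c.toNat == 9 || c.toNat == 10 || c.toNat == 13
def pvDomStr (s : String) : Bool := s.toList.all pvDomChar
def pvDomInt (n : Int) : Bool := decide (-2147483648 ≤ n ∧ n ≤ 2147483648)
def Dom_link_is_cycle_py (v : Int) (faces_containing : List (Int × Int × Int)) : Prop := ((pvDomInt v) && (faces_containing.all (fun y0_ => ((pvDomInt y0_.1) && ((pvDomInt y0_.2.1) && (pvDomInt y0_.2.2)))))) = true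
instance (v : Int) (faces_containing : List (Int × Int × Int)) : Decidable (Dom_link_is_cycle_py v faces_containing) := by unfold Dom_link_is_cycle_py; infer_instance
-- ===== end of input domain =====

-- B replaces the DFS-over-adjacency-list connectivity test by edge-list relaxation sweeps
-- and counts degrees with a plain counting dict (alternative decomposition, not faster).


-- ===== PORT A =====

-- '[x for x in face if x != v]' (both Pythons contain this comprehension verbatim)
def pvOpp (v : Int) (f : Int × Int × Int) : List Int :=
  [f.1, f.2.1, f.2.2].filter (fun x => decide (x ≠ v))

-- the first loop of A: link_edges (tuples kept as lists, lengths unknown) and the set link_verts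
def pvLinkA (v : Int) (faces : List (Int × Int × Int)) : List (List Int) × PySem.Set Int :=
  faces.foldl (fun st f =>
    (st.1 ++ [PySem.List.sorted (pvOpp v f) (fun x => x) false],
     PySem.Set.update st.2 (pvOpp v f))) ([], PySem.Set.empty)

-- 'for a, b in link_edges' tuple unpacking: none = ValueError
def pvUnpack2 : List (List Int) → Option (List (Int × Int))
  | [] => some []
  | e :: rest =>
    match e with
    | [a, b] => (pvUnpack2 rest).map (fun t => (a, b) :: t)
    | _ => none

-- the while-stack DFS of A; fuel only makes the loop total (2*|verts|+2 is proved enough)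
def pvDFS (adj : PySem.Dict Int (List Int)) : Nat → PySem.Set Int → List Int → PySem.Set Int
  | 0, seen, _ => seen
  | fuel + 1, seen, stk =>
    match stk.getLast? with
    | none => seen
    | some u =>
      let st := (adj.getD u []).foldl
        (fun (s : PySem.Set Int × List Int) w =>
          if w ∈ s.1 then s else (PySem.Set.add s.1 w, s.2 ++ [w]))
        (seen, stk.dropLast)
      pvDFS adj fuel st.1 st.2

def link_is_cycle_py (v : Int) (faces_containing : List (Int × Int × Int)) : Bool :=
  let p := pvLinkA v faces_containing
  let link_edges := p.1
  let link_verts := p.2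
  match link_verts with
  | [] => false                                     -- if not link_verts: return False
  | start :: _ =>
    match pvUnpack2 link_edges with
    | none => false                                 -- Python raises ValueError here (outside Pre_)
    | some edges =>
      let deg0 : PySem.Dict Int Int :=
        link_verts.foldl (fun d u => d.insert u 0) PySem.Dict.empty
      let deg := edges.foldl
        (fun d e => (d.modify e.1 0 (· + 1)).modify e.2 0 (· + 1)) deg0
      if deg.values.any (fun d => decide (d ≠ 2)) then false
      else
        let adj0 : PySem.Dict Int (List Int) :=
          link_verts.foldl (fun d u => d.insert u []) PySem.Dict.empty
        let adj := edges.foldl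
          (fun d e => (d.modify e.1 [] (· ++ [e.2])).modify e.2 [] (· ++ [e.1])) adj0
        let seen := pvDFS adj (2 * link_verts.length + 2) (PySem.Set.add PySem.Set.empty start) [start]
        decide (seen.length = link_verts.length)

-- ===== PORT B =====

-- B's vertex-collection loop (first-seen order, nested loop over the face's coordinates)
def pvVertsB (v : Int) (faces : List (Int × Int × Int)) : List Int :=
  faces.foldl (fun acc f =>
    [f.1, f.2.1, f.2.2].foldl
      (fun acc x => if x ≠ v ∧ x ∉ acc then acc ++ [x] else acc) acc) []

-- B's edge loop: 'a, b = sorted(x for x in face if x != v)'; none = ValueError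
def pvEdgesB (v : Int) : List (Int × Int × Int) → Option (List (Int × Int))
  | [] => some []
  | f :: rest =>
    match PySem.List.sorted (pvOpp v f) (fun x => x) false with
    | [a, b] => (pvEdgesB v rest).map (fun t => (a, b) :: t)
    | _ => none

-- one sweep of B's relaxation: 'for a, b in edges: if a in reach or b in reach: add both'
def pvStep (es : List (Int × Int)) (r : PySem.Set Int) : PySem.Set Int :=
  es.foldl
    (fun r e => if e.1 ∈ r ∨ e.2 ∈ r then PySem.Set.add (PySem.Set.add r e.1) e.2 else r) r

def link_is_cycle_py_alt (v : Int) (faces_containing : List (Int × Int × Int)) : Bool :=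
  let verts := pvVertsB v faces_containing
  match verts with
  | [] => false
  | start :: _ =>
    match pvEdgesB v faces_containing with
    | none => false                                 -- Python raises ValueError here (outside Pre_)
    | some edges =>
      let deg : PySem.Dict Int Int := edges.foldl
        (fun d e =>
          let d1 := d.insert e.1 (d.getD e.1 0 + 1)
          d1.insert e.2 (d1.getD e.2 0 + 1)) PySem.Dict.empty
      if verts.any (fun u => decide (deg.getD u 0 ≠ 2)) then false
      else
        let reach := (List.range verts.length).foldl
          (fun r _ => pvStep edges r) (PySem.Set.add PySem.Set.empty start)
        verts.all (fun u => decide (u ∈ reach))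

-- ===== PRECONDITION & SPEC =====
-- Pre_ excludes exactly the inputs on which Python A raises ValueError while unpacking a
-- link edge whose face does not contain v exactly once (B raises there too).
def Pre_link_is_cycle_py (v : Int) (faces_containing : List (Int × Int × Int)) : Prop :=
  (∀ f ∈ faces_containing, List.count v [f.1, f.2.1, f.2.2] = 1) ∨
  (∀ f ∈ faces_containing, f = (v, v, v))
instance (v : Int) (faces_containing : List (Int × Int × Int)) : Decidable (Pre_link_is_cycle_py v faces_containing) := by unfold Pre_link_is_cycle_py; infer_instance

def pvWitness_link_is_cycle_py : Int × (List (Int × Int × Int)) := (0, [(0, 1, 2), (0, 2, 1)])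

def Spec_link_is_cycle_py (v : Int) (faces_containing : List (Int × Int × Int)) (out : Bool) : Prop := out = link_is_cycle_py_alt v faces_containing
instance (v : Int) (faces_containing : List (Int × Int × Int)) (out : Bool) : Decidable (Spec_link_is_cycle_py v faces_containing out) := by unfold Spec_link_is_cycle_py; infer_instance

-- ===== CLAIM (what is proved, stated in full; the proofs are below) =====
def Claim_equal_link_is_cycle_py : Prop := ∀ (v : Int) (faces_containing : List (Int × Int × Int)), Dom_link_is_cycle_py v faces_containing → Pre_link_is_cycle_py v faces_containing → Spec_link_is_cycle_py v faces_containing (link_is_cycle_py v faces_containing)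

-- ===== LEMMAS AND PROOFS =====

-- ---------- the undirected relation generated by the edge list, and reachability ----------

def pvRel (es : List (Int × Int)) (x y : Int) : Prop := (x, y) ∈ es ∨ (y, x) ∈ es

def pvReach (es : List (Int × Int)) (s x : Int) : Prop := Relation.ReflTransGen (pvRel es) s x

-- ---------- phase 1: the two vertex/edge collections compute the same values ----------

theorem pvFaceFold_eq (v : Int) (f : Int × Int × Int) (acc : PySem.Set Int) :
    [f.1, f.2.1, f.2.2].foldl (fun acc x => if x ≠ v ∧ x ∉ acc then acc ++ [x] else acc) acc
      = PySem.Set.update acc (pvOpp v f) := by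
  rw [PySem.Set.update_eq_foldl, pvOpp,
    ← PySem.List.foldl_ite_eq_foldl_filter (fun x => x ≠ v) PySem.Set.add]
  refine PySem.List.foldl_congr_mem _ _ _ _ ?_
  intro acc x _
  by_cases hv : x = v
  · simp [hv]
  · by_cases hm : x ∈ acc
    · simp [hv, hm]
    · simp [hv, hm]

theorem pvVertsB_eq_foldl_update (v : Int) (faces : List (Int × Int × Int)) :
    pvVertsB v faces
      = faces.foldl (fun s f => PySem.Set.update s (pvOpp v f)) PySem.Set.empty := by
  unfold pvVertsB
  exact PySem.List.foldl_congr_mem _ _ _ _ (fun acc f _ => pvFaceFold_eq v f acc)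

theorem pvLinkA_eq (v : Int) (faces : List (Int × Int × Int)) :
    pvLinkA v faces
      = (faces.map (fun f => PySem.List.sorted (pvOpp v f) (fun x => x) false),
         pvVertsB v faces) := by
  unfold pvLinkA
  rw [PySem.List.foldl_prod_mk
        (f := fun acc f => acc ++ [PySem.List.sorted (pvOpp v f) (fun x => x) false])
        (g := fun s f => PySem.Set.update s (pvOpp v f)),
      PySem.List.foldl_append_singleton_eq_map, pvVertsB_eq_foldl_update]
  simp

theorem pvVertsB_nodup (v : Int) (faces : List (Int × Int × Int)) :
    (pvVertsB v faces).Nodup := by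
  rw [pvVertsB_eq_foldl_update]
  have : ∀ (l : List (Int × Int × Int)) (s : PySem.Set Int), s.Nodup →
      (l.foldl (fun s f => PySem.Set.update s (pvOpp v f)) s).Nodup := by
    intro l
    induction l with
    | nil => intro s hs; simpa using hs
    | cons f rest ih => intro s hs; exact ih _ (PySem.Set.nodup_update _ _ hs)
  exact this faces PySem.Set.empty (by simp [PySem.Set.empty])

theorem pvVertsB_mem (v : Int) (faces : List (Int × Int × Int)) (x : Int) :
    x ∈ pvVertsB v faces ↔ ∃ f ∈ faces, x ∈ pvOpp v f := by
  rw [pvVertsB_eq_foldl_update]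
  have : ∀ (l : List (Int × Int × Int)) (s : PySem.Set Int),
      x ∈ l.foldl (fun s f => PySem.Set.update s (pvOpp v f)) s
        ↔ x ∈ s ∨ ∃ f ∈ l, x ∈ pvOpp v f := by
    intro l
    induction l with
    | nil => intro s; simp
    | cons f rest ih =>
      intro s
      rw [List.foldl_cons, ih]
      simp [PySem.Set.mem_update]
      tauto
  rw [this]
  simp [PySem.Set.empty]

theorem pvUnpack2_map_eq (v : Int) (faces : List (Int × Int × Int)) :
    pvUnpack2 (faces.map (fun f => PySem.List.sorted (pvOpp v f) (fun x => x) false))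
      = pvEdgesB v faces := by
  induction faces with
  | nil => rfl
  | cons f rest ih =>
    simp only [List.map_cons, pvUnpack2, pvEdgesB]
    cases PySem.List.sorted (pvOpp v f) (fun x => x) false with
    | nil => rfl
    | cons a t =>
      cases t with
      | nil => rfl
      | cons b t2 =>
        cases t2 with
        | nil => simp [ih]
        | cons c t3 => rfl

theorem pvEdgesB_mem_verts (v : Int) (faces : List (Int × Int × Int))
    (es : List (Int × Int)) (h : pvEdgesB v faces = some es) :
    ∀ e ∈ es, e.1 ∈ pvVertsB v faces ∧ e.2 ∈ pvVertsB v faces := by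
  induction faces generalizing es with
  | nil =>
    simp only [pvEdgesB] at h
    cases h
    simp
  | cons f rest ih =>
    simp only [pvEdgesB] at h
    cases hs : PySem.List.sorted (pvOpp v f) (fun x => x) false with
    | nil => rw [hs] at h; cases h
    | cons a t =>
      cases t with
      | nil => rw [hs] at h; cases h
      | cons b t2 =>
        cases t2 with
        | cons c t3 => rw [hs] at h; cases h
        | nil =>
          rw [hs] at h
          cases he : pvEdgesB v rest with
          | none => rw [he] at h; cases h
          | some es' =>
            rw [he] at h
            simp only [Option.map_some] at h
            cases h
            intro e hme
            have hab : a ∈ pvOpp v f ∧ b ∈ pvOpp v f := by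
              have hperm := PySem.List.sorted_perm (pvOpp v f) (fun x => x) false
              rw [hs] at hperm
              constructor
              · exact hperm.subset (by simp)
              · exact hperm.subset (by simp)
            rcases List.mem_cons.mp hme with rfl | hme'
            · exact ⟨(pvVertsB_mem v _ _).mpr ⟨f, by simp, hab.1⟩,
                     (pvVertsB_mem v _ _).mpr ⟨f, by simp, hab.2⟩⟩
            · have := ih es' he e hme'
              exact ⟨(pvVertsB_mem v _ _).mpr (by
                        rcases (pvVertsB_mem v rest e.1).mp this.1 with ⟨g, hg, hx⟩
                        exact ⟨g, by simp [hg], hx⟩),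
                     (pvVertsB_mem v _ _).mpr (by
                        rcases (pvVertsB_mem v rest e.2).mp this.2 with ⟨g, hg, hx⟩
                        exact ⟨g, by simp [hg], hx⟩)⟩

-- ---------- phase 2: the two degree checks agree ----------

theorem pvDegA_flat (es : List (Int × Int)) (d : PySem.Dict Int Int) :
    es.foldl (fun d e => (d.modify e.1 0 (· + 1)).modify e.2 0 (· + 1)) d
      = (es.flatMap (fun e => [e.1, e.2])).foldl (fun d x => d.modify x 0 (· + 1)) d := by
  induction es generalizing d with
  | nil => rfl
  | cons e rest ih => simp [List.flatMap_cons, ih]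

theorem pvDegB_flat (es : List (Int × Int)) (d : PySem.Dict Int Int) :
    es.foldl (fun d e =>
        (d.insert e.1 (d.getD e.1 0 + 1)).insert e.2 ((d.insert e.1 (d.getD e.1 0 + 1)).getD e.2 0 + 1)) d
      = (es.flatMap (fun e => [e.1, e.2])).foldl (fun d x => d.insert x (d.getD x 0 + 1)) d := by
  induction es generalizing d with
  | nil => rfl
  | cons e rest ih => simp [List.flatMap_cons, ih]

theorem pvDeg0_getD (l : List Int) (x : Int) :
    (l.foldl (fun d u => d.insert u (0 : Int)) PySem.Dict.empty).getD x 0 = 0 := by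
  have : ∀ (l : List Int) (d : PySem.Dict Int Int), (∀ y, d.getD y 0 = 0) →
      ∀ x, (l.foldl (fun d u => d.insert u (0 : Int)) d).getD x 0 = 0 := by
    intro l
    induction l with
    | nil => intro d hd x; exact hd x
    | cons u rest ih =>
      intro d hd x
      refine ih _ ?_ x
      intro y
      rw [PySem.Dict.getD_insert]
      split <;> simp [hd]
  exact this l PySem.Dict.empty (by simp [pysem]) x

theorem pvDeg0_keys (l : List Int) (hl : l.Nodup) :
    (l.foldl (fun d u => d.insert u (0 : Int)) PySem.Dict.empty).keys = l := by
  rw [PySem.Dict.keys_foldl_insert l (fun _ _ => (0 : Int)) PySem.Dict.empty]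
  have h0 : (PySem.Dict.empty : PySem.Dict Int Int).keys = ([] : List Int) := by simp [pysem]
  rw [h0, PySem.Set.update_nil_left, PySem.Set.ofList_eq_self_of_nodup _ hl]

-- for a dict with nodup keys, 'any(p(val) for val in d.values())' is '∃ k ∈ keys, p (getD k 0)'
theorem pvValues_any_iff (d : PySem.Dict Int Int) (hn : d.keys.Nodup) (p : Int → Bool) :
    (d.values.any p = true) ↔ ∃ k ∈ d.keys, p (d.getD k 0) = true := by
  constructor
  · intro h
    rcases List.any_eq_true.mp h with ⟨w, hw, hp⟩
    rcases List.mem_map.mp hw with ⟨pr, hpr, rfl⟩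
    refine ⟨pr.1, PySem.Dict.mem_keys_of_mem_items d hpr, ?_⟩
    rw [PySem.Dict.getD_of_mem_items d (by exact hpr) hn 0]
    exact hp
  · rintro ⟨k, hk, hp⟩
    rcases List.mem_map.mp hk with ⟨pr, hpr, rfl⟩
    refine List.any_eq_true.mpr ⟨pr.2, List.mem_map.mpr ⟨pr, hpr, rfl⟩, ?_⟩
    rwa [PySem.Dict.getD_of_mem_items d (by exact hpr) hn 0] at hp

-- ---------- phase 3a: A's adjacency dict realises pvRel ----------

theorem pvAdjA_flat (es : List (Int × Int)) (d : PySem.Dict Int (List Int)) :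
    es.foldl (fun d e => (d.modify e.1 [] (· ++ [e.2])).modify e.2 [] (· ++ [e.1])) d
      = (es.flatMap (fun e => [(e.1, e.2), (e.2, e.1)])).foldl
          (fun d p => d.modify p.1 [] (· ++ [p.2])) d := by
  induction es generalizing d with
  | nil => rfl
  | cons e rest ih => simp [List.flatMap_cons, ih]

theorem pvAdj0_getD (l : List Int) (x : Int) :
    (l.foldl (fun d u => d.insert u ([] : List Int)) PySem.Dict.empty).getD x [] = [] := by
  have : ∀ (l : List Int) (d : PySem.Dict Int (List Int)), (∀ y, d.getD y [] = []) →
      ∀ x, (l.foldl (fun d u => d.insert u ([] : List Int)) d).getD x [] = [] := by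
    intro l
    induction l with
    | nil => intro d hd x; exact hd x
    | cons u rest ih =>
      intro d hd x
      refine ih _ ?_ x
      intro y
      rw [PySem.Dict.getD_insert]
      split <;> simp [hd]
  exact this l PySem.Dict.empty (by simp [pysem]) x

theorem pvAdjA_mem (es : List (Int × Int)) (l : List Int) (u w : Int) :
    w ∈ (es.foldl (fun d e => (d.modify e.1 [] (· ++ [e.2])).modify e.2 [] (· ++ [e.1]))
          (l.foldl (fun d u => d.insert u ([] : List Int)) PySem.Dict.empty)).getD u []
      ↔ pvRel es u w := by
  rw [pvAdjA_flat, PySem.Dict.getD_foldl_modify_append, pvAdj0_getD]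
  simp only [List.nil_append, List.mem_map, List.mem_filter, List.mem_flatMap]
  constructor
  · rintro ⟨p, ⟨⟨e, he, hp⟩, hpu⟩, rfl⟩
    have hu : p.1 = u := by simpa using hpu
    simp only [List.mem_cons] at hp
    rcases hp with rfl | hp
    · exact Or.inl (by simpa [← hu] using he)
    · rcases hp with rfl | hp
      · exact Or.inr (by simpa [← hu] using he)
      · cases hp
  · rintro (h | h)
    · exact ⟨(u, w), ⟨⟨(u, w), h, by simp⟩, by simp⟩, rfl⟩
    · exact ⟨(u, w), ⟨⟨(w, u), h, by simp⟩, by simp⟩, rfl⟩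

-- ---------- phase 3b: the DFS inner loop over one adjacency list ----------

theorem pvDFS_inner (ws : List Int) :
    ∀ (seen : PySem.Set Int) (stk0 : List Int), (seen).Nodup →
    ∃ t : List Int,
      ws.foldl (fun (s : PySem.Set Int × List Int) w =>
          if w ∈ s.1 then s else (PySem.Set.add s.1 w, s.2 ++ [w])) (seen, stk0)
        = (seen ++ t, stk0 ++ t)
      ∧ (∀ x ∈ t, x ∈ ws ∧ x ∉ seen)
      ∧ (∀ w ∈ ws, w ∈ seen ++ t)
      ∧ (seen ++ t).Nodup := by
  induction ws with
  | nil => intro seen stk0 hn; exact ⟨[], by simp, by simp, by simp, by simpa using hn⟩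
  | cons w ws ih =>
    intro seen stk0 hn
    by_cases hw : w ∈ seen
    · rcases ih seen stk0 hn with ⟨t, heq, ht, hws, hnd⟩
      refine ⟨t, ?_, ?_, ?_, hnd⟩
      · simpa [hw] using heq
      · intro x hx
        rcases ht x hx with ⟨hxw, hxs⟩
        exact ⟨by simp [hxw], hxs⟩
      · intro w' hw'
        rcases List.mem_cons.mp hw' with rfl | hw'
        · exact List.mem_append.mpr (Or.inl hw)
        · exact hws w' hw'
    · have hadd : PySem.Set.add seen w = seen ++ [w] := PySem.Set.add_of_not_mem hw
      have hn' : (seen ++ [w]).Nodup := by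
        rw [List.nodup_append]
        refine ⟨hn, by simp, ?_⟩
        intro a ha b hb
        have hbw : b = w := by simpa using hb
        subst hbw
        intro hc
        exact hw (hc ▸ ha)
      rcases ih (seen ++ [w]) (stk0 ++ [w]) hn' with ⟨t, heq, ht, hws, hnd⟩
      refine ⟨w :: t, ?_, ?_, ?_, by simpa using hnd⟩
      · simp only [List.foldl_cons, if_neg hw, hadd, heq]
        simp
      · intro x hx
        rcases List.mem_cons.mp hx with rfl | hx
        · exact ⟨by simp, hw⟩
        · rcases ht x hx with ⟨hxw, hxs⟩
          exact ⟨by simp [hxw], fun hc => hxs (by simp [hc])⟩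
      · intro w' hw'
        rcases List.mem_cons.mp hw' with rfl | hw'
        · simp
        · have := hws w' hw'
          simpa using this

-- ---------- phase 3c: the DFS computes exactly the reachable set ----------

theorem pvDFS_spec (adj : PySem.Dict Int (List Int)) (es : List (Int × Int)) (V : List Int)
    (s : Int)
    (hadj : ∀ u w, w ∈ adj.getD u [] ↔ pvRel es u w)
    (hV : ∀ e ∈ es, e.1 ∈ V ∧ e.2 ∈ V) :
    ∀ (fuel : Nat) (seen : PySem.Set Int) (stk : List Int),
    seen.Nodup → (∀ x ∈ stk, x ∈ seen) → s ∈ seen →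
    (∀ x ∈ seen, pvReach es s x) → (∀ x ∈ seen, x ∈ V) →
    (∀ u ∈ seen, u ∉ stk → ∀ w, pvRel es u w → w ∈ seen) →
    2 * (V.length - seen.length) + stk.length ≤ fuel →
    (pvDFS adj fuel seen stk).Nodup ∧ s ∈ pvDFS adj fuel seen stk ∧
    (∀ x ∈ pvDFS adj fuel seen stk, pvReach es s x) ∧
    (∀ x ∈ pvDFS adj fuel seen stk, x ∈ V) ∧
    (∀ u ∈ pvDFS adj fuel seen stk, ∀ w, pvRel es u w → w ∈ pvDFS adj fuel seen stk) := by
  intro fuel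
  induction fuel with
  | zero =>
    intro seen stk hnd hsub hs hreach hinV hclose hfuel
    have hstk : stk = [] := by
      have : stk.length = 0 := by omega
      exact List.length_eq_zero_iff.mp this
    subst hstk
    simp only [pvDFS]
    exact ⟨hnd, hs, hreach, hinV, fun u hu w hw => hclose u hu (by simp) w hw⟩
  | succ fuel ih =>
    intro seen stk hnd hsub hs hreach hinV hclose hfuel
    cases hlast : stk.getLast? with
    | none =>
      have hstk : stk = [] := by simpa using hlast
      subst hstk
      simp only [pvDFS, List.getLast?_nil]
      exact ⟨hnd, hs, hreach, hinV, fun u hu w hw => hclose u hu (by simp) w hw⟩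
    | some u =>
      rcases List.getLast?_eq_some_iff.mp hlast with ⟨stk0, rfl⟩
      have hu_seen : u ∈ seen := hsub u (by simp)
      have hdrop : (stk0 ++ [u]).dropLast = stk0 := by simp
      rcases pvDFS_inner (adj.getD u []) seen stk0 hnd with ⟨t, heq, ht, hws, hnd'⟩
      have hstep : pvDFS adj (fuel + 1) seen (stk0 ++ [u]) = pvDFS adj fuel (seen ++ t) (stk0 ++ t) := by
        simp only [pvDFS, hlast, hdrop, heq]
      rw [hstep]
      -- new invariants
      have hsub' : ∀ x ∈ stk0 ++ t, x ∈ seen ++ t := by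
        intro x hx
        rcases List.mem_append.mp hx with hx | hx
        · exact List.mem_append.mpr (Or.inl (hsub x (by simp [hx])))
        · exact List.mem_append.mpr (Or.inr hx)
      have hreach' : ∀ x ∈ seen ++ t, pvReach es s x := by
        intro x hx
        rcases List.mem_append.mp hx with hx | hx
        · exact hreach x hx
        · rcases ht x hx with ⟨hxw, _⟩
          exact Relation.ReflTransGen.tail (hreach u hu_seen) ((hadj u x).mp hxw)
      have hinV' : ∀ x ∈ seen ++ t, x ∈ V := by
        intro x hx
        rcases List.mem_append.mp hx with hx | hx
        · exact hinV x hx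
        · rcases ht x hx with ⟨hxw, _⟩
          rcases (hadj u x).mp hxw with h | h
          · exact (hV _ h).2
          · exact (hV _ h).1
      have hclose' : ∀ u' ∈ seen ++ t, u' ∉ stk0 ++ t → ∀ w, pvRel es u' w → w ∈ seen ++ t := by
        intro u' hu' hnst w hrel
        rcases List.mem_append.mp hu' with hu' | hu'
        · by_cases huu : u' = u
          · subst huu
            exact hws w ((hadj u' w).mpr hrel)
          · have : u' ∉ stk0 ++ [u] := by
              intro hc
              rcases List.mem_append.mp hc with hc | hc
              · exact hnst (List.mem_append.mpr (Or.inl hc))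
              · exact huu (by simpa using hc)
            exact List.mem_append.mpr (Or.inl (hclose u' hu' this w hrel))
        · exact absurd (List.mem_append.mpr (Or.inr hu')) hnst
      have hlen : (seen ++ t).length ≤ V.length := by
        have := (hnd'.subperm (fun x hx => hinV' x hx)).length_le
        exact this
      have hfuel' : 2 * (V.length - (seen ++ t).length) + (stk0 ++ t).length ≤ fuel := by
        have h1 : (seen ++ t).length = seen.length + t.length := by simp
        have h2 : (stk0 ++ t).length = stk0.length + t.length := by simp
        have h3 : (stk0 ++ [u]).length = stk0.length + 1 := by simp
        rw [h3] at hfuel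
        have hseenV : seen.length ≤ V.length := (hnd.subperm (fun x hx => hinV x hx)).length_le
        have hlen2 : seen.length + t.length ≤ V.length := by rw [h1] at hlen; exact hlen
        rw [h1, h2]
        omega
      exact ih (seen ++ t) (stk0 ++ t) hnd' hsub'
        (List.mem_append.mpr (Or.inl hs)) hreach' hinV' hclose' hfuel'

-- ---------- phase 3d: properties of one relaxation sweep ----------

theorem pvStep_subset (es : List (Int × Int)) (r : PySem.Set Int) :
    ∀ x ∈ r, x ∈ pvStep es r := by
  induction es generalizing r with
  | nil => intro x hx; simpa [pvStep] using hx
  | cons e rest ih =>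
    intro x hx
    simp only [pvStep, List.foldl_cons]
    by_cases h : e.1 ∈ r ∨ e.2 ∈ r
    · rw [if_pos h]
      exact ih _ x (by simp [PySem.Set.mem_add, hx])
    · rw [if_neg h]
      exact ih r x hx

theorem pvStep_sub_mem (es : List (Int × Int)) (r : PySem.Set Int) (es' : List (Int × Int))
    (hsub : ∀ e ∈ es, e ∈ es') (s : Int) (hr : ∀ x ∈ r, pvReach es' s x) :
    ∀ x ∈ pvStep es r, pvReach es' s x := by
  induction es generalizing r with
  | nil => intro x hx; exact hr x (by simpa [pvStep] using hx)
  | cons e rest ih =>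
    intro x hx
    simp only [pvStep, List.foldl_cons] at hx
    by_cases h : e.1 ∈ r ∨ e.2 ∈ r
    · rw [if_pos h] at hx
      refine ih _ (fun e' he' => hsub e' (by simp [he'])) ?_ x hx
      intro y hy
      rcases (PySem.Set.mem_add _ _ _).mp hy with hy' | rfl
      · rcases (PySem.Set.mem_add _ _ _).mp hy' with hy'' | rfl
        · exact hr y hy''
        · rcases h with h1 | h2
          · exact hr _ h1
          · exact Relation.ReflTransGen.tail (hr _ h2) (Or.inr (hsub e (by simp)))
      · rcases h with h1 | h2
        · exact Relation.ReflTransGen.tail (hr _ h1) (Or.inl (hsub e (by simp)))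
        · exact hr _ h2
    · rw [if_neg h] at hx
      exact ih r (fun e' he' => hsub e' (by simp [he'])) hr x hx

theorem pvStep_nodup (es : List (Int × Int)) (r : PySem.Set Int) (h : r.Nodup) :
    (pvStep es r).Nodup := by
  induction es generalizing r with
  | nil => simpa [pvStep] using h
  | cons e rest ih =>
    simp only [pvStep, List.foldl_cons]
    split
    · exact ih _ (PySem.Set.nodup_add _ _ (PySem.Set.nodup_add _ _ h))
    · exact ih _ h

theorem pvStep_subV (es : List (Int × Int)) (V : List Int) (hV : ∀ e ∈ es, e.1 ∈ V ∧ e.2 ∈ V)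
    (r : PySem.Set Int) (h : ∀ x ∈ r, x ∈ V) : ∀ x ∈ pvStep es r, x ∈ V := by
  induction es generalizing r with
  | nil => intro x hx; exact h x (by simpa [pvStep] using hx)
  | cons e rest ih =>
    intro x hx
    simp only [pvStep, List.foldl_cons] at hx
    by_cases hc : e.1 ∈ r ∨ e.2 ∈ r
    · rw [if_pos hc] at hx
      refine ih (fun e' he' => hV e' (by simp [he'])) _ ?_ x hx
      intro y hy
      rcases (PySem.Set.mem_add _ _ _).mp hy with hy' | rfl
      · rcases (PySem.Set.mem_add _ _ _).mp hy' with hy'' | rfl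
        · exact h y hy''
        · exact (hV e (by simp)).1
      · exact (hV e (by simp)).2
    · rw [if_neg hc] at hx
      exact ih (fun e' he' => hV e' (by simp [he'])) r h x hx

theorem pvStep_append (es : List (Int × Int)) (r : PySem.Set Int) :
    ∃ t, pvStep es r = r ++ t := by
  induction es generalizing r with
  | nil => exact ⟨[], by simp [pvStep]⟩
  | cons e rest ih =>
    simp only [pvStep, List.foldl_cons]
    by_cases hc : e.1 ∈ r ∨ e.2 ∈ r
    · rw [if_pos hc]
      have h0 : ∃ t0, (r.add e.1).add e.2 = r ++ t0 := by
        rw [PySem.Set.add_eq_ite, PySem.Set.add_eq_ite]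
        split_ifs with h1 h2 h3
        · exact ⟨[], by simp⟩
        · exact ⟨[e.2], rfl⟩
        · exact ⟨[e.1], rfl⟩
        · exact ⟨[e.1, e.2], by simp⟩
      rcases h0 with ⟨t0, ht0⟩
      rcases ih ((r.add e.1).add e.2) with ⟨t1, ht1⟩
      refine ⟨t0 ++ t1, ?_⟩
      show pvStep rest ((r.add e.1).add e.2) = r ++ (t0 ++ t1)
      rw [ht1, ht0, List.append_assoc]
    · rw [if_neg hc]
      exact ih r

theorem pvStep_fix_closed (es : List (Int × Int)) (r : PySem.Set Int)
    (hfix : pvStep es r = r) :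
    ∀ e ∈ es, (e.1 ∈ r ∨ e.2 ∈ r) → e.1 ∈ r ∧ e.2 ∈ r := by
  suffices h : ∀ (l : List (Int × Int)) (r : PySem.Set Int),
      ∀ e ∈ l, (e.1 ∈ r ∨ e.2 ∈ r) → e.1 ∈ pvStep l r ∧ e.2 ∈ pvStep l r by
    intro e he hc
    have := h es r e he hc
    rwa [hfix] at this
  intro l
  induction l with
  | nil => intro r e he; cases he
  | cons e' rest ih =>
    intro r e he hc
    simp only [pvStep, List.foldl_cons]
    rcases List.mem_cons.mp he with rfl | he'
    · rw [if_pos hc]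
      constructor
      · exact pvStep_subset rest _ e.1 (by simp [PySem.Set.mem_add])
      · exact pvStep_subset rest _ e.2 (by simp [PySem.Set.mem_add])
    · by_cases hc' : e'.1 ∈ r ∨ e'.2 ∈ r
      · rw [if_pos hc']
        refine ih _ e he' ?_
        rcases hc with h1 | h2
        · exact Or.inl (by simp [PySem.Set.mem_add, h1])
        · exact Or.inr (by simp [PySem.Set.mem_add, h2])
      · rw [if_neg hc']
        exact ih r e he' hc

-- ---------- phase 3e: the iterated sweeps reach a fixpoint computing reachability ----------

theorem pvRangeFoldl_eq_iterate (es : List (Int × Int)) (n : Nat) (r0 : PySem.Set Int) :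
    (List.range n).foldl (fun r _ => pvStep es r) r0 = (pvStep es)^[n] r0 := by
  induction n with
  | zero => rfl
  | succ n ih =>
    rw [List.range_succ, List.foldl_append, ih, Function.iterate_succ_apply']
    rfl

theorem pvIter_nodup (es : List (Int × Int)) (r0 : PySem.Set Int) (h : r0.Nodup) (k : Nat) :
    ((pvStep es)^[k] r0).Nodup := by
  induction k with
  | zero => simpa using h
  | succ k ih => rw [Function.iterate_succ_apply']; exact pvStep_nodup _ _ ih

theorem pvIter_subV (es : List (Int × Int)) (V : List Int)
    (hV : ∀ e ∈ es, e.1 ∈ V ∧ e.2 ∈ V) (r0 : PySem.Set Int) (h : ∀ x ∈ r0, x ∈ V) (k : Nat) :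
    ∀ x ∈ (pvStep es)^[k] r0, x ∈ V := by
  induction k with
  | zero => simpa using h
  | succ k ih => rw [Function.iterate_succ_apply']; exact pvStep_subV es V hV _ ih

theorem pvIter_reach (es : List (Int × Int)) (s : Int) (r0 : PySem.Set Int)
    (h : ∀ x ∈ r0, pvReach es s x) (k : Nat) :
    ∀ x ∈ (pvStep es)^[k] r0, pvReach es s x := by
  induction k with
  | zero => simpa using h
  | succ k ih =>
    rw [Function.iterate_succ_apply']
    exact pvStep_sub_mem es _ es (fun e he => he) s ih

theorem pvIter_start_mem (es : List (Int × Int)) (s : Int) (k : Nat) :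
    s ∈ (pvStep es)^[k] [s] := by
  induction k with
  | zero => simp
  | succ k ih => rw [Function.iterate_succ_apply']; exact pvStep_subset es _ s ih

theorem pvFix_persist (es : List (Int × Int)) (r0 : PySem.Set Int) (j : Nat)
    (hfix : pvStep es ((pvStep es)^[j] r0) = (pvStep es)^[j] r0) :
    ∀ m, j ≤ m → (pvStep es)^[m] r0 = (pvStep es)^[j] r0 := by
  intro m hm
  induction m, hm using Nat.le_induction with
  | base => rfl
  | succ m hm ih => rw [Function.iterate_succ_apply', ih, hfix]

theorem pvIter_fix (es : List (Int × Int)) (V : List Int) (s : Int)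
    (hV : ∀ e ∈ es, e.1 ∈ V ∧ e.2 ∈ V) (hs : s ∈ V) :
    pvStep es ((pvStep es)^[V.length] [s]) = (pvStep es)^[V.length] [s] := by
  by_contra hne
  have hall : ∀ j < V.length, pvStep es ((pvStep es)^[j] [s]) ≠ (pvStep es)^[j] [s] := by
    intro j hj hfix
    apply hne
    have h1 := pvFix_persist es [s] j hfix V.length (le_of_lt hj)
    rw [h1]
    exact hfix
  have hgrow : ∀ k, k ≤ V.length → k + 1 ≤ ((pvStep es)^[k] [s]).length := by
    intro k
    induction k with
    | zero => intro _; simp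
    | succ k ih =>
      intro hk
      have hk' : k < V.length := by omega
      have h1 := ih (le_of_lt hk')
      rcases pvStep_append es ((pvStep es)^[k] [s]) with ⟨t, ht⟩
      have hne' := hall k hk'
      have htne : t ≠ [] := by
        intro hc
        rw [hc, List.append_nil] at ht
        exact hne' ht
      have : 1 ≤ t.length := by
        cases t with
        | nil => exact absurd rfl htne
        | cons a t' => simp
      rw [Function.iterate_succ_apply', ht, List.length_append]
      omega
  have h1 := hgrow V.length (le_refl _)
  have h2 : ((pvStep es)^[V.length] [s]).length ≤ V.length := by
    have hnd := pvIter_nodup es [s] (by simp) V.length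
    have hsub := pvIter_subV es V hV [s] (by simpa using hs) V.length
    exact (hnd.subperm hsub).length_le
  omega

theorem pvIter_mem_iff (es : List (Int × Int)) (V : List Int) (s : Int)
    (hV : ∀ e ∈ es, e.1 ∈ V ∧ e.2 ∈ V) (hVnd : V.Nodup) (hs : s ∈ V) (x : Int) :
    x ∈ (pvStep es)^[V.length] [s] ↔ pvReach es s x := by
  constructor
  · exact fun h => pvIter_reach es s [s]
      (by intro y hy; rcases List.mem_singleton.mp hy with rfl; exact Relation.ReflTransGen.refl)
      V.length x h
  · intro h
    have hclosed : ∀ u ∈ (pvStep es)^[V.length] [s], ∀ w, pvRel es u w →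
        w ∈ (pvStep es)^[V.length] [s] := by
      intro u hu w hrel
      rcases hrel with he | he
      · exact (pvStep_fix_closed es _ (pvIter_fix es V s hV hs) (u, w) he (Or.inl hu)).2
      · exact (pvStep_fix_closed es _ (pvIter_fix es V s hV hs) (w, u) he (Or.inr hu)).1
    induction h with
    | refl => exact pvIter_start_mem es s V.length
    | tail hab hbc ih => exact hclosed _ ih _ hbc

-- ---------- phase 2/3 corollaries used by the final assembly ----------

theorem pvSet_update_of_forall_mem (xs : List Int) :
    ∀ (s : PySem.Set Int), (∀ x ∈ xs, x ∈ s) → PySem.Set.update s xs = s := by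
  induction xs with
  | nil => intro s _; simp [PySem.Set.update_nil]
  | cons x rest ih =>
    intro s h
    rw [PySem.Set.update_cons, PySem.Set.add_of_mem (h x (by simp))]
    exact ih s (fun y hy => h y (by simp [hy]))

theorem pvDeg_eq (V : List Int) (hVnd : V.Nodup) (es : List (Int × Int))
    (hsub : ∀ e ∈ es, e.1 ∈ V ∧ e.2 ∈ V) :
    ((es.foldl (fun d e => (d.modify e.1 0 (· + 1)).modify e.2 0 (· + 1))
        (V.foldl (fun d u => d.insert u (0 : Int)) PySem.Dict.empty)).values.any
          (fun d => decide (d ≠ 2)))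
      = V.any (fun u => decide ((es.foldl (fun d e =>
          (d.insert e.1 (d.getD e.1 0 + 1)).insert e.2 ((d.insert e.1 (d.getD e.1 0 + 1)).getD e.2 0 + 1)) (PySem.Dict.empty : PySem.Dict Int Int)).getD u 0 ≠ 2)) := by
  have hflatsub : ∀ x ∈ es.flatMap (fun e => [e.1, e.2]), x ∈ V := by
    intro x hx
    rcases List.mem_flatMap.mp hx with ⟨e, he, hxe⟩
    rcases List.mem_cons.mp hxe with rfl | hxe
    · exact (hsub e he).1
    · rcases List.mem_singleton.mp hxe with rfl
      exact (hsub e he).2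
  -- the A-side dict: keys V, value at u = the endpoint count of u
  have hkeysA : (es.foldl (fun d e => (d.modify e.1 0 (· + 1)).modify e.2 0 (· + 1))
      (V.foldl (fun d u => d.insert u (0 : Int)) PySem.Dict.empty)).keys = V := by
    rw [pvDegA_flat, PySem.Dict.keys_foldl_modify _ 0 (fun _ _ w => w + 1), pvDeg0_keys V hVnd,
      pvSet_update_of_forall_mem _ V hflatsub]
  have hgetA : ∀ u : Int, (es.foldl (fun d e => (d.modify e.1 0 (· + 1)).modify e.2 0 (· + 1))
      (V.foldl (fun d u => d.insert u (0 : Int)) PySem.Dict.empty)).getD u 0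
        = ((es.flatMap (fun e => [e.1, e.2])).count u : Int) := by
    intro u
    rw [pvDegA_flat, PySem.Dict.getD_foldl_modify_add_one, pvDeg0_getD]
    simp
  have hgetB : ∀ u : Int, (es.foldl (fun d e =>
      (d.insert e.1 (d.getD e.1 0 + 1)).insert e.2 ((d.insert e.1 (d.getD e.1 0 + 1)).getD e.2 0 + 1)) (PySem.Dict.empty : PySem.Dict Int Int)).getD u 0
        = ((es.flatMap (fun e => [e.1, e.2])).count u : Int) := by
    intro u
    rw [pvDegB_flat, PySem.Dict.getD_foldl_insert_add_one]
    simp [pysem]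
  apply Bool.eq_iff_iff.mpr
  rw [pvValues_any_iff _ (by rw [hkeysA]; exact hVnd), List.any_eq_true]
  constructor
  · rintro ⟨k, hk, hp⟩
    rw [hkeysA] at hk
    refine ⟨k, hk, ?_⟩
    rw [decide_eq_true_iff, hgetB k]
    rw [decide_eq_true_iff, hgetA k] at hp
    exact hp
  · rintro ⟨k, hk, hp⟩
    refine ⟨k, by rw [hkeysA]; exact hk, ?_⟩
    rw [decide_eq_true_iff, hgetA k]
    rw [decide_eq_true_iff, hgetB k] at hp
    exact hp

theorem pvConn_eq (es : List (Int × Int)) (V : List Int) (start : Int)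
    (hVnd : V.Nodup) (hV : ∀ e ∈ es, e.1 ∈ V ∧ e.2 ∈ V) (hstart : start ∈ V) :
    decide ((pvDFS (es.foldl (fun d e => (d.modify e.1 [] (· ++ [e.2])).modify e.2 [] (· ++ [e.1]))
          (V.foldl (fun d u => d.insert u ([] : List Int)) PySem.Dict.empty))
        (2 * V.length + 2) (PySem.Set.add PySem.Set.empty start) [start]).length = V.length)
      = V.all (fun u => decide (u ∈ (List.range V.length).foldl (fun r _ => pvStep es r)
          (PySem.Set.add PySem.Set.empty start))) := by
  have hempty : PySem.Set.add PySem.Set.empty start = [start] := by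
    rw [PySem.Set.add_of_not_mem (by simp [PySem.Set.empty])]
    simp [PySem.Set.empty]
  rw [hempty]
  set adjA := es.foldl (fun d e => (d.modify e.1 [] (· ++ [e.2])).modify e.2 [] (· ++ [e.1]))
      (V.foldl (fun d u => d.insert u ([] : List Int)) PySem.Dict.empty) with hadjA
  have hadj : ∀ u w, w ∈ adjA.getD u [] ↔ pvRel es u w :=
    fun u w => pvAdjA_mem es V u w
  have h1V : (1 : Nat) ≤ V.length := by
    cases V with
    | nil => cases hstart
    | cons a t => simp
  have hspec := pvDFS_spec adjA es V start hadj hV (2 * V.length + 2) [start] [start]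
    (by simp) (by simp) (by simp)
    (by intro x hx; rcases List.mem_singleton.mp hx with rfl; exact Relation.ReflTransGen.refl)
    (by intro x hx; rcases List.mem_singleton.mp hx with rfl; exact hstart)
    (by
      intro u hu hnin w hrel
      rcases List.mem_singleton.mp hu with rfl
      exact absurd (List.mem_singleton.mpr rfl) hnin)
    (by simp only [List.length_singleton]; omega)
  rcases hspec with ⟨hnd, hsmem, hreach, hinV, hclose⟩
  have hmem_iff : ∀ x, x ∈ pvDFS adjA (2 * V.length + 2) [start] [start] ↔ pvReach es start x := by
    intro x
    constructor
    · exact hreach x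
    · intro h
      induction h with
      | refl => exact hsmem
      | tail hab hbc ih => exact hclose _ ih _ hbc
  apply Bool.eq_iff_iff.mpr
  rw [decide_eq_true_iff, List.all_eq_true, pvRangeFoldl_eq_iterate]
  constructor
  · intro hlen u hu
    have hVsub : ∀ x ∈ V, x ∈ pvDFS adjA (2 * V.length + 2) [start] [start] := by
      have hsp := hnd.subperm hinV
      have hperm := hsp.perm_of_length_le (by omega)
      exact fun x hx => hperm.symm.subset hx
    rw [decide_eq_true_iff, pvIter_mem_iff es V start hV hVnd hstart]
    exact (hmem_iff u).mp (hVsub u hu)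
  · intro hall
    have hVsub : ∀ x ∈ V, x ∈ pvDFS adjA (2 * V.length + 2) [start] [start] := by
      intro x hx
      have hx' := hall x hx
      rw [decide_eq_true_iff, pvIter_mem_iff es V start hV hVnd hstart] at hx'
      exact (hmem_iff x).mpr hx'
    have hle1 := (hnd.subperm hinV).length_le
    have hle2 := (hVnd.subperm hVsub).length_le
    omega

-- ---------- final assembly ----------

theorem pv_main (v : Int) (faces : List (Int × Int × Int)) :
    link_is_cycle_py v faces = link_is_cycle_py_alt v faces := by
  simp only [link_is_cycle_py, link_is_cycle_py_alt, pvLinkA_eq, pvUnpack2_map_eq]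
  cases hVs : pvVertsB v faces with
  | nil => rfl
  | cons start rest =>
    cases hE : pvEdgesB v faces with
    | none => rfl
    | some es =>
      dsimp only
      have hVnd : (start :: rest).Nodup := by
        rw [← hVs]; exact pvVertsB_nodup v faces
      have hsub : ∀ e ∈ es, e.1 ∈ (start :: rest) ∧ e.2 ∈ (start :: rest) := by
        rw [← hVs]; exact pvEdgesB_mem_verts v faces es hE
      rw [pvDeg_eq (start :: rest) hVnd es hsub]
      by_cases hc : ((start :: rest).any (fun u => decide ((es.foldl (fun d e =>
          (d.insert e.1 (d.getD e.1 0 + 1)).insert e.2 ((d.insert e.1 (d.getD e.1 0 + 1)).getD e.2 0 + 1)) (PySem.Dict.empty : PySem.Dict Int Int)).getD u 0 ≠ 2)) = true)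
      · rw [if_pos hc, if_pos hc]
      · rw [if_neg hc, if_neg hc]
        exact pvConn_eq es (start :: rest) start hVnd hsub (by simp)

-- ===== VERDICT (by name: the statement is the Claim_ definition above) =====
theorem link_is_cycle_py_spec : Claim_equal_link_is_cycle_py := by
  intro v faces _ _
  unfold Spec_link_is_cycle_py
  exact pv_main v faces
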